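-- pv_equiv track=rewrite | github.com/unison20252Programacion1/reloj-arena-actualizado-SolNedo | solucion.py | reloj_arena
-- ===== SOURCE A (Python) =====
-- def reloj_arena(m: int, s: str) -> str:
--     # validar altura mayor que 0 e imprimir "Error: La altura debe ser un entero positivo" y salir
--     if m <= 0:
--         return "Error: La altura debe ser un entero positivo"
--     # la segunda línea no puede estar vacía: el primer carácter se usa para dibujar
--     if s is None or len(s) == 0:
--         return "Error: El caracter no puede ser una cadena vacia"
--     ch = s[0]
--     lines = []
--     # Parte superior: m líneas, desde 2*m-1 hasta 1
--     for k in range(0, m):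
--         espacios = k
--         cuenta = 2 * (m - k) - 1
--         lines.append(" " * espacios + ch * cuenta)
--     # Parte inferior: m-1 líneas, desde 3 hasta 2*m-1
--     for l in range(1, m):
--         espacios = m - l - 1
--         cuenta = 2 * l + 1
--         lines.append(" " * espacios + ch * cuenta)
--     return "\n".join(lines)
-- ===== SOURCE B (Python) =====
-- def reloj_arena(m: int, s: str) -> str:
--     if m <= 0:
--         return "Error: La altura debe ser un entero positivo"
--     if s is None or len(s) == 0:
--         return "Error: El caracter no puede ser una cadena vacia"
--     ch = s[0]
--     # start from the widest row and derive each next row from the previous one: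
--     # narrowing = add a leading space, chop two trailing chars; widening = the inverse
--     row = ch * (2 * m - 1)
--     out = [row]
--     for _ in range(m - 1):
--         row = " " + row[:-2]
--         out.append(row)
--     for _ in range(m - 1):
--         row = row[1:] + ch + ch
--         out.append(row)
--     return "\n".join(out)
-- ===== Notes on version B (the rewrite author's own statement) =====
-- stated objective: alternative
-- what changed: B starts from the widest row and derives each successive row from the previous one by string surgery (prepend a space and chop two trailing chars going down, drop the leading space and append two chars going up) instead of A's two index loops computing each row's spaces and width arithmetically from (k, m).
import Mathlib
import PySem

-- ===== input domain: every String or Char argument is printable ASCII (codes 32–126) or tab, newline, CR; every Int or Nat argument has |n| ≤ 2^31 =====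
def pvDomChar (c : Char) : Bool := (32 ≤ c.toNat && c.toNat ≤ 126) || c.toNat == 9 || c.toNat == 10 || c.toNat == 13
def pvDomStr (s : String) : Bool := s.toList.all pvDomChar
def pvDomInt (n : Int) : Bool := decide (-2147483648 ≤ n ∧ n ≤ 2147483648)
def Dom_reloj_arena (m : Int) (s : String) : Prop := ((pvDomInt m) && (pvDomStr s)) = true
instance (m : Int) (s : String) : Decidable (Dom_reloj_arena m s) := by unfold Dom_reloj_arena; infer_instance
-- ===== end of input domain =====

-- B starts from the widest row and derives each next row from the previous one by string
-- surgery (" " + row[:-2] narrowing, row[1:] + 2 chars widening) instead of A's two index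
-- loops computing each row's spaces/width arithmetically; objective: alternative.


-- ===== PORT A =====
def reloj_arena (m : Int) (s : String) : String :=
  if m ≤ 0 then "Error: La altura debe ser un entero positivo"
  else if PySem.Str.len s = 0 then "Error: El caracter no puede ser una cadena vacia"
  else
    let ch := s.toList.headD ' '   -- s[0]; s is nonempty here
    -- for k in range(0, m): lines.append(" "*k + ch*(2*(m-k)-1))
    let lines := (PySem.List.pyRange 0 m 1).foldl
      (fun acc k => acc ++ [String.ofList (List.replicate k.toNat ' ' ++ List.replicate (2*(m-k)-1).toNat ch)]) []
    -- for l in range(1, m): lines.append(" "*(m-l-1) + ch*(2*l+1))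
    let lines := (PySem.List.pyRange 1 m 1).foldl
      (fun acc l => acc ++ [String.ofList (List.replicate (m-l-1).toNat ' ' ++ List.replicate (2*l+1).toNat ch)]) lines
    PySem.Str.join "\n" lines

-- ===== PORT B =====
-- rows are carried as their character lists; " " + row[:-2] is ' ' :: row.dropLast.dropLast
-- (exact: Python's s[:-2] drops the last two chars, all of a shorter string) and row[1:] is row.drop 1 (exact).
def pvStep1 (p : List Char × List String) : List Char × List String :=
  let row := ' ' :: p.1.dropLast.dropLast        -- row = " " + row[:-2]
  (row, p.2 ++ [String.ofList row])              -- out.append(row)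

def pvStep2 (ch : Char) (p : List Char × List String) : List Char × List String :=
  let row := p.1.drop 1 ++ [ch, ch]              -- row = row[1:] + ch + ch
  (row, p.2 ++ [String.ofList row])              -- out.append(row)

def reloj_arena_alt (m : Int) (s : String) : String :=
  if m ≤ 0 then "Error: La altura debe ser un entero positivo"
  else if PySem.Str.len s = 0 then "Error: El caracter no puede ser una cadena vacia"
  else
    let ch := s.toList.headD ' '   -- s[0]; s is nonempty here
    let row := List.replicate (2*m-1).toNat ch   -- row = ch * (2*m - 1)
    -- for _ in range(m - 1): row = " " + row[:-2]; out.append(row)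
    let st := (List.range (m-1).toNat).foldl (fun p _ => pvStep1 p) (row, [String.ofList row])
    -- for _ in range(m - 1): row = row[1:] + ch + ch; out.append(row)
    let st := (List.range (m-1).toNat).foldl (fun p _ => pvStep2 ch p) st
    PySem.Str.join "\n" st.2

-- ===== PRECONDITION & SPEC =====
def Spec_reloj_arena (m : Int) (s : String) (out : String) : Prop := out = reloj_arena_alt m s
instance (m : Int) (s : String) (out : String) : Decidable (Spec_reloj_arena m s out) := by unfold Spec_reloj_arena; infer_instance

-- ===== CLAIM (what is proved, stated in full; the proofs are below) =====
def Claim_equal_reloj_arena : Prop := ∀ (m : Int) (s : String), Dom_reloj_arena m s → Spec_reloj_arena m s (reloj_arena m s)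

-- ===== LEMMAS AND PROOFS =====

-- the k-th row of the top half / l-th row of the bottom half, as character lists
def pvRowT (ch : Char) (mn k : Nat) : List Char :=
  List.replicate k ' ' ++ List.replicate (2*(mn-k)-1) ch
def pvRowB (ch : Char) (mn l : Nat) : List Char :=
  List.replicate (mn-1-l) ' ' ++ List.replicate (2*l+1) ch

-- a foldl that ignores the list elements is an iterate
theorem pv_foldl_ignore {α : Type} (f : α → α) (init : α) (j : Nat) :
    (List.range j).foldl (fun p _ => f p) init = f^[j] init := by
  induction j with
  | zero => rfl
  | succ j ih =>
    rw [List.range_succ, List.foldl_append, ih, Function.iterate_succ_apply']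
    rfl

-- narrowing one step: " " + row[:-2] turns row k of the top half into row k+1
theorem pv_rec1 (ch : Char) (mn k : Nat) (h : k + 2 ≤ mn) :
    ' ' :: (pvRowT ch mn k).dropLast.dropLast = pvRowT ch mn (k+1) := by
  unfold pvRowT
  have hc : 2*(mn-k)-1 = (2*(mn-(k+1))-1) + 1 + 1 := by omega
  rw [hc, List.replicate_succ', ← List.append_assoc, List.dropLast_concat,
    List.replicate_succ', ← List.append_assoc, List.dropLast_concat,
    List.replicate_succ, List.cons_append]

-- widening one step: row[1:] + ch + ch turns row l of the bottom half into row l+1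
theorem pv_rec2 (ch : Char) (mn l : Nat) (h : l + 2 ≤ mn) :
    (pvRowB ch mn l).drop 1 ++ [ch, ch] = pvRowB ch mn (l+1) := by
  unfold pvRowB
  have hs : mn-1-l = (mn-1-(l+1)) + 1 := by omega
  have hc : 2*(l+1)+1 = (2*l+1) + 1 + 1 := by omega
  rw [hs, List.replicate_succ, List.cons_append, List.drop_succ_cons, List.drop_zero,
    hc, List.replicate_succ', List.replicate_succ', List.append_assoc]
  have h2 : List.replicate (2*l+2) ch = List.replicate (2*l) ch ++ [ch, ch] := by
    rw [List.replicate_add]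
    rfl
  simp [h2]

-- loop 1 invariant: after j narrowing steps the state is row j and the first j+1 top rows
theorem pv_loop1 (ch : Char) (mn : Nat) : ∀ j, j + 1 ≤ mn →
    pvStep1^[j] (pvRowT ch mn 0, [String.ofList (pvRowT ch mn 0)])
      = (pvRowT ch mn j, (List.range (j+1)).map (fun k => String.ofList (pvRowT ch mn k))) := by
  intro j hj
  induction j with
  | zero => simp
  | succ j ih =>
    rw [Function.iterate_succ_apply', ih (by omega)]
    unfold pvStep1
    simp only
    rw [pv_rec1 ch mn j (by omega), List.range_succ (n := j + 1), List.map_append]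
    rfl

-- loop 2 invariant: after j widening steps the state is row j and the appended j bottom rows
theorem pv_loop2 (ch : Char) (mn : Nat) (L0 : List String) : ∀ j, j + 1 ≤ mn →
    (pvStep2 ch)^[j] (pvRowB ch mn 0, L0)
      = (pvRowB ch mn j, L0 ++ (List.range j).map (fun i => String.ofList (pvRowB ch mn (i+1)))) := by
  intro j hj
  induction j with
  | zero => simp
  | succ j ih =>
    rw [Function.iterate_succ_apply', ih (by omega)]
    unfold pvStep2
    simp only
    rw [pv_rec2 ch mn j (by omega), List.range_succ, List.map_append, ← List.append_assoc]
    rfl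

theorem reloj_arena_eq (m : Int) (s : String) : reloj_arena m s = reloj_arena_alt m s := by
  unfold reloj_arena reloj_arena_alt
  split_ifs with hm hs
  · rfl
  · rfl
  · have hm' : 0 < m := by omega
    obtain ⟨n, hn⟩ : ∃ n : Nat, m.toNat = n + 1 := ⟨m.toNat - 1, by omega⟩
    simp only [PySem.List.foldl_append_singleton_eq_map, List.nil_append, pv_foldl_ignore]
    rw [show (m - 1).toNat = n by omega,
      show List.replicate (2*m-1).toNat (s.toList.headD ' ') = pvRowT (s.toList.headD ' ') (n+1) 0 by
        unfold pvRowT; rw [show (2*m-1).toNat = 2*(n+1-0)-1 by omega]; simp,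
      pv_loop1 _ (n+1) n (by omega),
      show pvRowT (s.toList.headD ' ') (n+1) n = pvRowB (s.toList.headD ' ') (n+1) 0 by
        unfold pvRowT pvRowB
        rw [show n+1-1-0 = n by omega, show 2*(n+1-n)-1 = 2*0+1 by omega],
      pv_loop2 _ (n+1) _ n (by omega)]
    congr 1
    congr 1
    · -- top halves agree row by row
      rw [PySem.List.pyRange_one, List.map_map, show (m-0).toNat = n + 1 by omega]
      apply List.map_congr_left
      intro k hk
      simp only [List.mem_range] at hk
      simp only [Function.comp_apply]
      unfold pvRowT
      congr 2
      · congr 1; omega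
      · congr 1; omega
    · -- bottom halves agree row by row
      rw [PySem.List.pyRange_one, List.map_map, show (m-1).toNat = n by omega]
      apply List.map_congr_left
      intro k hk
      simp only [List.mem_range] at hk
      simp only [Function.comp_apply]
      unfold pvRowB
      congr 2
      · congr 1; omega
      · congr 1; omega

-- ===== VERDICT (by name: the statement is the Claim_ definition above) =====
theorem reloj_arena_spec : Claim_equal_reloj_arena := by
  intro m s _
  exact reloj_arena_eq m s
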